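-- pv_equiv track=rewrite | github.com/PaulZaman/WeatherBot | ChatBot.py | extract_cities
-- ===== SOURCE A (Python) =====
-- import string
--
-- def extract_cities(user_input, known_cities):
--     user_input = user_input.lower()
--     user_input = user_input.translate(str.maketrans("", "", string.punctuation))
--     user_input = user_input.replace("-", " ").replace(' ', '')
--     for city in known_cities:
--         city_normalized = city.lower().replace(" ", "")
--         if city_normalized in user_input:
--             return city
--     return None
-- ===== SOURCE B (Python) =====
-- import string
--
-- def extract_cities(user_input, known_cities):
--     remove = set(string.punctuation) | {' '}
--     text = ''.join(ch for ch in user_input.lower() if ch not in remove)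
--     norms = [city.lower().replace(' ', '') for city in known_cities]
--     n = len(text)
--     subs = {text[i:i + l] for l in {len(nc) for nc in norms} for i in range(n - l + 1)}
--     for city, nc in zip(known_cities, norms):
--         if nc in subs:
--             return city
--     return None
-- ===== Notes on version B (the rewrite author's own statement) =====
-- stated objective: alternative
-- what changed: Instead of running a substring search over the normalized input for every city, B builds one hash set of the input's substrings of the distinct normalized-city lengths and answers each city by a set lookup; normalization is a single filter pass instead of translate plus two replaces.
import Mathlib
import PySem

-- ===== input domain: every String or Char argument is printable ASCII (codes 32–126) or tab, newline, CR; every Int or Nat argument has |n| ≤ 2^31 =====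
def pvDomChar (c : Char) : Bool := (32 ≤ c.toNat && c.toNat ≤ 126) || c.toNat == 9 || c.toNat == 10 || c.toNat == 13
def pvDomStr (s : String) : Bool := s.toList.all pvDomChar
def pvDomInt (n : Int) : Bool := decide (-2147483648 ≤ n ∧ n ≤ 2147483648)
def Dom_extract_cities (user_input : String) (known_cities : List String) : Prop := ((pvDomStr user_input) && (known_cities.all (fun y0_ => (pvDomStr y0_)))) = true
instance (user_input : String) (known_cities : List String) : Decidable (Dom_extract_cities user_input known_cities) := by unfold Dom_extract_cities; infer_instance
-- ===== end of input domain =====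

-- B replaces A's per-city substring search by one precomputed set of the normalized
-- input's substrings of the (distinct) normalized-city lengths, looked up per city;
-- objective: alternative (a different algorithm and data structure of similar size).

-- string.punctuation
def pvPunct : List Char := "!\"#$%&'()*+,-./:;<=>?@[\\]^_`{|}~".toList

-- ===== PORT A =====
-- the for-loop over known_cities
def pvLoopA (u : List Char) : List String → Option String
  | [] => none
  | city :: rest =>
      let city_normalized := PySem.Chars.replace (PySem.Chars.lower city.toList) [' '] []
      if PySem.Chars.isIn city_normalized u then some city else pvLoopA u rest

def extract_cities (user_input : String) (known_cities : List String) : Option String :=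
  let u1 := PySem.Chars.lower user_input.toList
  -- translate(str.maketrans("", "", string.punctuation)) deletes exactly the punctuation
  -- characters: a filter (exact; the table maps nothing else)
  let u2 := u1.filter (fun c => !(pvPunct.contains c))
  let u3 := PySem.Chars.replace (PySem.Chars.replace u2 ['-'] [' ']) [' '] []
  pvLoopA u3 known_cities

-- ===== PORT B =====
-- set(string.punctuation) | {' '}
def pvRemove : PySem.Set Char := PySem.Set.union (PySem.Set.ofList pvPunct) (PySem.Set.ofList [' '])

-- {text[i:i+l] for l in lens for i in range(n - l + 1)}
def pvSubs (text : List Char) (lens : List Nat) : PySem.Set (List Char) :=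
  PySem.Set.ofList (lens.flatMap (fun (l : Nat) =>
    (PySem.List.pyRange 0 ((text.length : Int) - (l : Int) + 1)).map
      (fun (i : Int) => PySem.List.slice text (some i) (some (i + (l : Int))))))

-- the for-loop over zip(known_cities, norms)
def pvLoopB (subs : PySem.Set (List Char)) : List (String × List Char) → Option String
  | [] => none
  | (city, nc) :: rest => if subs.contains nc then some city else pvLoopB subs rest

def extract_cities_alt (user_input : String) (known_cities : List String) : Option String :=
  let text := (PySem.Chars.lower user_input.toList).filter (fun ch => !(pvRemove.contains ch))
  let norms := known_cities.map (fun city => PySem.Chars.replace (PySem.Chars.lower city.toList) [' '] [])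
  let subs := pvSubs text (PySem.Set.ofList (norms.map (·.length)))
  pvLoopB subs (known_cities.zip norms)

-- ===== PRECONDITION & SPEC =====
def Spec_extract_cities (user_input : String) (known_cities : List String) (out : Option String) : Prop := out = extract_cities_alt user_input known_cities
instance (user_input : String) (known_cities : List String) (out : Option String) : Decidable (Spec_extract_cities user_input known_cities out) := by unfold Spec_extract_cities; infer_instance

-- ===== CLAIM (what is proved, stated in full; the proofs are below) =====
def Claim_equal_extract_cities : Prop := ∀ (user_input : String) (known_cities : List String), Dom_extract_cities user_input known_cities → Spec_extract_cities user_input known_cities (extract_cities user_input known_cities)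

-- ===== LEMMAS AND PROOFS =====

-- replace with a one-character pattern is a flatMap
theorem pvReplace_go_singleton (c : Char) (new : List Char) :
    ∀ (l : List Char) (fuel : Nat) (acc : List Char), l.length ≤ fuel →
      PySem.Chars.replace.go [c] new fuel l acc
        = acc.reverse ++ l.flatMap (fun x => if x = c then new else [x]) := by
  intro l
  induction l with
  | nil => intro fuel acc _; cases fuel <;> simp [PySem.Chars.replace.go]
  | cons x t ih =>
      intro fuel acc h
      cases fuel with
      | zero => simp at h
      | succ fuel =>
          by_cases hx : x = c
          · subst hx
            simp [PySem.Chars.replace.go, List.isPrefixOf, ih fuel _ (by simpa using h)]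
          · have hpre : [c].isPrefixOf (x :: t) = false := by
              simp [List.isPrefixOf, Ne.symm hx]
            simp [PySem.Chars.replace.go, hpre, hx, ih fuel _ (by simpa using h)]

theorem pvReplace_singleton (l : List Char) (c : Char) (new : List Char) :
    PySem.Chars.replace l [c] new = l.flatMap (fun x => if x = c then new else [x]) := by
  simp [PySem.Chars.replace, pvReplace_go_singleton c new l l.length [] le_rfl]

-- A's normalization pipeline equals B's single filter
theorem pvNorm_eq (cs : List Char) :
    PySem.Chars.replace (PySem.Chars.replace (cs.filter (fun c => !(pvPunct.contains c))) ['-'] [' ']) [' '] []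
      = cs.filter (fun ch => !(pvRemove.contains ch)) := by
  simp only [pvReplace_singleton]
  induction cs with
  | nil => simp
  | cons x t ih =>
      have hrem : x ∈ pvRemove ↔ x ∈ pvPunct ∨ x = ' ' := by
        simp [pvRemove, PySem.Set.mem_union, PySem.Set.mem_ofList]
      by_cases hp : x ∈ pvPunct
      · simpa [hp, hrem] using ih
      · have hx : x ≠ '-' := by
          rintro rfl; exact hp (by decide)
        by_cases hs : x = ' '
        · subst hs
          simpa [hp, hrem] using ih
        · simpa [hp, hrem, hs, hx] using ih

-- membership in the substring set
theorem pvSubs_contains (text : List Char) (lens : List Nat) (nc : List Char)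
    (hlen : nc.length ∈ lens) :
    (pvSubs text lens).contains nc = PySem.Chars.isIn nc text := by
  have key : (pvSubs text lens).contains nc = true ↔ nc <:+: text := by
    simp only [pvSubs, PySem.Set.contains_eq_decide, PySem.Set.mem_ofList, decide_eq_true_eq,
      List.mem_flatMap, List.mem_map]
    constructor
    · rintro ⟨l, -, i, hi, hslice⟩
      rw [PySem.List.mem_pyRange_one] at hi
      obtain ⟨hi0, hilt⟩ := hi
      obtain ⟨a, rfl⟩ : ∃ a : Nat, i = (a : Int) := ⟨i.toNat, (Int.toNat_of_nonneg hi0).symm⟩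
      have hcast : (a : Int) + (l : Int) = ((a + l : Nat) : Int) := by push_cast; ring
      rw [hcast, PySem.List.slice_natCast, Nat.add_sub_cancel_left] at hslice
      subst hslice
      exact ((List.take_prefix _ _).isInfix).trans ((List.drop_suffix _ _).isInfix)
    · rintro ⟨pre, suf, htext⟩
      refine ⟨nc.length, hlen, (pre.length : Int), ?_, ?_⟩
      · rw [PySem.List.mem_pyRange_one]
        have hL : text.length = pre.length + nc.length + suf.length := by
          rw [← htext]; simp; omega
        refine ⟨by exact_mod_cast Int.natCast_nonneg _, by omega⟩
      · have hcast : (pre.length : Int) + (nc.length : Int) = ((pre.length + nc.length : Nat) : Int) := by push_cast; ring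
        rw [hcast, PySem.List.slice_natCast, Nat.add_sub_cancel_left]
        have hdrop : text.drop pre.length = nc ++ suf := by
          rw [← htext, List.append_assoc, List.drop_left]
        rw [hdrop]
        simp
  rw [Bool.eq_iff_iff, key, PySem.Chars.isIn_iff_infix]

-- the two loops agree
theorem pvLoop_eq (text : List Char) (lens : List Nat) :
    ∀ (cities : List String),
      (∀ city ∈ cities, (PySem.Chars.replace (PySem.Chars.lower city.toList) [' '] []).length ∈ lens) →
      pvLoopB (pvSubs text lens) (cities.zip (cities.map (fun city => PySem.Chars.replace (PySem.Chars.lower city.toList) [' '] []))) = pvLoopA text cities := by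
  intro cities
  induction cities with
  | nil => intro _; rfl
  | cons city rest ih =>
      intro h
      have h1 := h city (by simp)
      simp only [List.map_cons, List.zip_cons_cons, pvLoopB, pvLoopA,
        pvSubs_contains text lens _ h1]
      split
      · rfl
      · exact ih (fun c hc => h c (List.mem_cons_of_mem _ hc))

-- ===== VERDICT (by name: the statement is the Claim_ definition above) =====
theorem extract_cities_spec : Claim_equal_extract_cities := by
  intro user_input known_cities _
  unfold Spec_extract_cities extract_cities extract_cities_alt
  simp only [pvNorm_eq]
  exact (pvLoop_eq _ _ known_cities (fun city hc => by
    simp only [PySem.Set.mem_ofList, List.mem_map]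
    exact ⟨_, ⟨city, hc, rfl⟩, rfl⟩)).symm
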